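-- pv_equiv track=rewrite | github.com/ketkat001/SWEA | D2/SW1928.py | six_bitChar
-- ===== SOURCE A (Python) =====
-- def six_bitChar(arg):           # 64bit 문자 리스트 작성
--     m = []
--     x = 0
--     for i in range(26):         # 배열에 인덱스 0 부터 25 까지 대문자 A부터Z 의 아스키코드를 삽입
--         x = chr(ord('A') + i)
--         m.append(x)
--         x = 0
--     for i in range(26):         # 배열에 인덱스 26부터 51 까지 소문자 a부터z 의 아스키코드를 삽입
--         x = chr(ord('a') + i)
--         m.append(x)
--         x = 0
--
--     for i in range(10):         # 배열에 인덱스 52부터 61 까지 0부터 9까지의 아스키코드 삽입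
--         x = chr(ord('0') + i)
--         m.append(x)
--         x = 0
--     m.append(chr(ord('+')))
--     m.append(chr(ord('/')))
--
--     for num in range(len(m)):
--         if m[num] == arg:       # arg에 대응하는 값을 반환한다.
--             return num
-- ===== SOURCE B (Python) =====
-- def six_bitChar(arg):
--     # Direct arithmetic on the character code instead of building a 64-entry table and scanning it.
--     if not isinstance(arg, str) or len(arg) != 1:
--         return None
--     c = ord(arg)
--     if 65 <= c <= 90:          # 'A'..'Z'
--         return c - 65
--     if 97 <= c <= 122:         # 'a'..'z'
--         return 26 + c - 97
--     if 48 <= c <= 57:          # '0'..'9'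
--         return 52 + c - 48
--     if c == 43:                # '+'
--         return 62
--     if c == 47:                # '/'
--         return 63
--     return None
-- ===== Notes on version B (the rewrite author's own statement) =====
-- stated objective: simpler
-- what changed: Replaced building a 64-entry base64 table and linearly scanning it with a length guard plus direct range arithmetic on the character code.
import Mathlib
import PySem

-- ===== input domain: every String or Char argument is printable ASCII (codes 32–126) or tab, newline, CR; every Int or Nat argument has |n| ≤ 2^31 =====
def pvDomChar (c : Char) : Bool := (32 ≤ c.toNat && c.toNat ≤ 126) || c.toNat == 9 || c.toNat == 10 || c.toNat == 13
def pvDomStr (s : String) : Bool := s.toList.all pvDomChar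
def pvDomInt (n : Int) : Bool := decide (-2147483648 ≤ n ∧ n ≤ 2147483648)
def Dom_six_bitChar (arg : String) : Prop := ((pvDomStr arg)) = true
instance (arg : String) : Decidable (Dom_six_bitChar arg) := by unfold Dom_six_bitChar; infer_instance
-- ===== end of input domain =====

-- B replaces A's 64-entry table build + linear scan with a length guard and direct range arithmetic on the character code (simpler, constant-time).


-- ===== PORT A =====
-- the table m as A builds it: three range-loops appending chr(ord('X')+i), then '+' and '/'
def pvTable : List String :=
  let m : List String := []
  let m := (PySem.List.pyRange 0 26 1).foldl
    (fun m i => m ++ [String.ofList [Char.ofNat ('A'.toNat + i.toNat)]]) m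
  let m := (PySem.List.pyRange 0 26 1).foldl
    (fun m i => m ++ [String.ofList [Char.ofNat ('a'.toNat + i.toNat)]]) m
  let m := (PySem.List.pyRange 0 10 1).foldl
    (fun m i => m ++ [String.ofList [Char.ofNat ('0'.toNat + i.toNat)]]) m
  m ++ [String.ofList ['+']] ++ [String.ofList ['/']]

-- 'for num in range(len(m)): if m[num] == arg: return num' (falls off the end -> None)
def pvScan (arg : String) (m : List String) : List Int → Option Int
  | [] => none
  | num :: rest =>
    match PySem.List.pyGet? m num with
    | none => none
    | some s => if s == arg then some num else pvScan arg m rest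

def six_bitChar (arg : String) : Option Int :=
  pvScan arg pvTable (PySem.List.pyRange 0 (pvTable.length : Int) 1)

-- ===== PORT B =====
def six_bitChar_alt (arg : String) : Option Int :=
  match arg.toList with
  | [c] =>
    let n : Int := c.toNat
    if 65 ≤ n ∧ n ≤ 90 then some (n - 65)
    else if 97 ≤ n ∧ n ≤ 122 then some (26 + n - 97)
    else if 48 ≤ n ∧ n ≤ 57 then some (52 + n - 48)
    else if n = 43 then some 62
    else if n = 47 then some 63
    else none
  | _ => none

-- ===== PRECONDITION & SPEC =====
def Spec_six_bitChar (arg : String) (out : Option Int) : Prop := out = six_bitChar_alt arg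
instance (arg : String) (out : Option Int) : Decidable (Spec_six_bitChar arg out) := by unfold Spec_six_bitChar; infer_instance

-- ===== CLAIM (what is proved, stated in full; the proofs are below) =====
def Claim_equal_six_bitChar : Prop := ∀ (arg : String), Dom_six_bitChar arg → Spec_six_bitChar arg (six_bitChar arg)

-- ===== LEMMAS AND PROOFS =====

-- every table entry is a single-character string
lemma pvTable_len1 : ∀ s ∈ pvTable, s.toList.length = 1 := by decide

-- if arg equals no table entry, the scan returns none
lemma pvScan_none (arg : String) (m : List String)
    (h : ∀ s ∈ m, s ≠ arg) : ∀ nums, pvScan arg m nums = none := by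
  intro nums
  induction nums with
  | nil => rfl
  | cons num rest ih =>
    unfold pvScan
    cases hg : PySem.List.pyGet? m num with
    | none => simp
    | some s =>
      have hne : s ≠ arg := h s (PySem.List.mem_of_pyGet?_eq_some m hg)
      simp [hne, ih]

-- single-character agreement, checked over all ASCII codes
set_option maxRecDepth 40000 in
set_option maxHeartbeats 2000000 in
lemma pv_single : ∀ n < 127,
    six_bitChar (String.ofList [Char.ofNat n]) = six_bitChar_alt (String.ofList [Char.ofNat n]) := by
  decide

-- ===== VERDICT (by name: the statement is the Claim_ definition above) =====
theorem six_bitChar_spec : Claim_equal_six_bitChar := by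
  intro arg hdom
  unfold Spec_six_bitChar
  cases hl : arg.toList with
  | nil =>
    have hA : six_bitChar arg = none := by
      apply pvScan_none
      intro s hs hsa
      have h1 := pvTable_len1 s hs
      rw [hsa] at h1
      rw [hl] at h1
      simp at h1
    rw [hA]
    unfold six_bitChar_alt
    rw [hl]
  | cons c t =>
    cases t with
    | nil =>
      have harg : arg = String.ofList [c] := String.toList_inj.mp (by simpa using hl)
      have hc : pvDomChar c = true := by
        unfold Dom_six_bitChar pvDomStr at hdom
        rw [List.all_eq_true] at hdom
        exact hdom c (by rw [hl]; simp)
      have hlt : c.toNat < 127 := by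
        unfold pvDomChar at hc; simp at hc; omega
      have h := pv_single c.toNat hlt
      rw [harg]
      simpa [Char.ofNat_toNat] using h
    | cons c2 t2 =>
      have hA : six_bitChar arg = none := by
        apply pvScan_none
        intro s hs hsa
        have h1 := pvTable_len1 s hs
        rw [hsa] at h1
        rw [hl] at h1
        simp at h1
      rw [hA]
      unfold six_bitChar_alt
      rw [hl]
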